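-- pv_equiv track=rewrite | github.com/1yohanyo1/python_coding_test | codingtest/CodingTestChallenge_12/18.py | bfs
-- ===== SOURCE A (Python) =====
-- from collections import deque
--
-- def bfs(start, graph, n):
--     visited  = [False] * (n + 1)
--     queue = deque()
--     queue.append((start, 0))
--     visited[start] = True # 상근이 번호 1번
--     count = 0
--
--     while queue:
--         currnet, depth = queue.popleft()
--
--         # bfs 탐색 깊이가 2가 되면 while문 탈출
--         if depth == 2:
--             break
--
--         for i in graph[currnet]:
--             if not visited[i]:
--                 visited[i] = True
--                 queue.append((i, depth + 1))
--                 count += 1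
--
--     return count
-- ===== SOURCE B (Python) =====
-- def bfs(start, graph, n):
--     # Level-synchronous BFS over frontier sets: expand two layers and count them.
--     visited = {start}
--     level1 = set(graph[start]) - visited
--     visited |= level1
--     level2 = set()
--     for v in level1:
--         level2 |= set(graph[v])
--     level2 -= visited
--     return len(level1) + len(level2)
-- ===== Notes on version B (the rewrite author's own statement) =====
-- stated objective: alternative
-- what changed: Replaces the deque-of-(node,depth) loop with break-at-depth-2 and the (n+1)-slot visited boolean array by two level-synchronous frontier expansions over sets (level1 = set(graph[start]) minus {start}; level2 = union of the level1 neighborhoods minus visited), returning len(level1)+len(level2).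
-- outside the precondition, e.g. on bfs(0, {0: [-1, 1], 1: [], -1: []}, 1): A returns 1, B returns 2
import Mathlib
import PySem

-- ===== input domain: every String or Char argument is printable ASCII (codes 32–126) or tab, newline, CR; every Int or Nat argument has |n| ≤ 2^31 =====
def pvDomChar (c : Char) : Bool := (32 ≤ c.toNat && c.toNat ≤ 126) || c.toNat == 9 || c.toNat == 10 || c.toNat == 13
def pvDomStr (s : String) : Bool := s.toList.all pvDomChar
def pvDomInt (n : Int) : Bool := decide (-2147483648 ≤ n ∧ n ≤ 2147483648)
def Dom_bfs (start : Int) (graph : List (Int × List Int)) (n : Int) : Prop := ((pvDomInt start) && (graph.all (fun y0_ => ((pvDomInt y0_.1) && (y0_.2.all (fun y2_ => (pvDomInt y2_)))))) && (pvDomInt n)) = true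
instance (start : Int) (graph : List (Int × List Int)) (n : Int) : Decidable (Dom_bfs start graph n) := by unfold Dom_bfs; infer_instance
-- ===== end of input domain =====

-- B replaces A's deque-of-(node,depth) loop and boolean visited array by two
-- level-synchronous frontier expansions over sets (alternative decomposition, same cost class).

-- ===== PORT A =====
-- the inner 'for i in graph[currnet]' loop of A, acting on the state (visited, queue, count)
def expandA (depth : Int) (ns : List Int) (st : List Bool × List (Int × Int) × Int) :
    List Bool × List (Int × Int) × Int :=
  ns.foldl (fun s i =>
    if PySem.List.pyGetD s.1 i true then s
    else (PySem.List.pySetD s.1 i true, s.2.1 ++ [(i, depth + 1)], s.2.2 + 1)) st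

-- each push of expandA flips one visited slot from false to true, so the
-- measure 2·#false-slots + queue-length never grows across one iteration (termination of the while loop)
-- setting a false slot to true removes exactly one false slot
theorem countP_false_set (v : List Bool) : ∀ k : Nat, ∀ h : k < v.length, v[k] = false →
    (v.set k true).countP (fun b => !b) + 1 = v.countP (fun b => !b) := by
  induction v with
  | nil => intro k h _; simp at h
  | cons b t ih =>
    intro k h hv
    cases k with
    | zero => simp at hv; subst hv; simp
    | succ m =>
      simp only [List.length_cons, Nat.succ_lt_succ_iff] at h
      simp only [List.getElem_cons_succ] at hv
      simp only [List.set_cons_succ, List.countP_cons]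
      have := ih m h hv
      omega

-- a false read resolves to an in-range position holding false, and pySetD writes there
theorem read_false_resolve (v : List Bool) (i : Int) (h : PySem.List.pyGetD v i true = false) :
    ∃ k : Nat, ∃ hk : k < v.length, v[k] = false ∧ PySem.List.pySetD v i true = v.set k true := by
  have h1 : PySem.List.pyGet? v i = some false := by
    unfold PySem.List.pyGetD at h
    cases hg : PySem.List.pyGet? v i with
    | none => rw [hg] at h; simp at h
    | some b => rw [hg] at h; simp at h; rw [h]
  unfold PySem.List.pyGet? at h1
  cases hidx : PySem.List.pyIdx? v.length i with
  | none => rw [hidx] at h1; simp at h1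
  | some k =>
    rw [hidx] at h1
    simp only [Option.bind_some] at h1
    rw [List.getElem?_eq_some_iff] at h1
    obtain ⟨hk, hval⟩ := h1
    refine ⟨k, hk, hval, ?_⟩
    unfold PySem.List.pySetD PySem.List.pySet?
    rw [hidx]
    rfl

theorem expandA_measure (depth : Int) (ns : List Int) : ∀ (v : List Bool) (q : List (Int × Int)) (c : Int),
    2 * ((expandA depth ns (v, q, c)).1.countP (fun b => !b)) + (expandA depth ns (v, q, c)).2.1.length ≤
      2 * (v.countP (fun b => !b)) + q.length := by
  induction ns with
  | nil => intro v q c; simp [expandA]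
  | cons i t ih =>
    intro v q c
    cases hread : PySem.List.pyGetD v i true with
    | true =>
      have hstep : expandA depth (i :: t) (v, q, c) = expandA depth t (v, q, c) := by
        simp [expandA, hread]
      rw [hstep]
      exact ih v q c
    | false =>
      have hstep : expandA depth (i :: t) (v, q, c) =
          expandA depth t (PySem.List.pySetD v i true, q ++ [(i, depth + 1)], c + 1) := by
        simp [expandA, hread]
      rw [hstep]
      obtain ⟨k, hk, hval, hset⟩ := read_false_resolve v i hread
      have hcnt := countP_false_set v k hk hval
      have := ih (PySem.List.pySetD v i true) (q ++ [(i, depth + 1)]) (c + 1)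
      rw [hset] at this ⊢
      simp only [List.length_append, List.length_singleton] at this
      omega

-- A's 'while queue:' loop
def bfsLoopA (g : PySem.Dict Int (List Int)) (v : List Bool) (q : List (Int × Int)) (c : Int) : Int :=
  match q with
  | [] => c
  | (cur, depth) :: rest =>
    if depth == 2 then c
    else
      let r := expandA depth (g.getD cur []) (v, rest, c)
      bfsLoopA g r.1 r.2.1 r.2.2
termination_by 2 * (v.countP (fun b => !b)) + q.length
decreasing_by
  have h := expandA_measure depth (g.getD cur []) v rest c
  simp only [List.length_cons]
  omega

def bfs (start : Int) (graph : List (Int × List Int)) (n : Int) : Int :=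
  let g : PySem.Dict Int (List Int) := PySem.Dict.mk graph
  let visited := PySem.List.pySetD (List.replicate (n + 1).toNat false) start true
  bfsLoopA g visited [(start, 0)] 0

-- ===== PORT B =====
def bfs_alt (start : Int) (graph : List (Int × List Int)) (n : Int) : Int :=
  let g : PySem.Dict Int (List Int) := PySem.Dict.mk graph
  let visited0 : PySem.Set Int := PySem.Set.ofList [start]
  let level1 : PySem.Set Int := PySem.Set.diff (PySem.Set.ofList (g.getD start [])) visited0
  let visited : PySem.Set Int := PySem.Set.union visited0 level1
  let level2 : PySem.Set Int :=
    PySem.Set.diff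
      (level1.foldl (fun acc v => PySem.Set.union acc (PySem.Set.ofList (g.getD v []))) PySem.Set.empty)
      visited
  PySem.Set.len level1 + PySem.Set.len level2

-- ===== PRECONDITION & SPEC =====
-- label x is a legal index into the (n+1)-slot visited array
def slotOK (n x : Int) : Prop := -(n + 1) ≤ x ∧ x ≤ n
-- the visited-array slot Python's (possibly negative) index x denotes
def slot (n x : Int) : Int := if x < 0 then x + (n + 1) else x
-- every node label the algorithm indexes with: start, its neighbors, and their neighbors
def touched (start : Int) (graph : List (Int × List Int)) : List Int :=
  start :: (PySem.Dict.mk graph).getD start [] ++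
    ((PySem.Dict.mk graph).getD start []).flatMap (fun v => (PySem.Dict.mk graph).getD v [])
-- Pre_ excludes exactly: inputs where A raises (IndexError/KeyError), and the accidental corner
-- where two distinct touched labels denote the same visited slot through Python's negative-index
-- wraparound (x and x+n+1 both touched), on which A's count is an artefact of its array encoding.
def Pre_bfs (start : Int) (graph : List (Int × List Int)) (n : Int) : Prop :=
  0 ≤ n ∧ slotOK n start ∧ (PySem.Dict.mk graph).contains start = true ∧
  (∀ v ∈ (PySem.Dict.mk graph).getD start [],
    slotOK n v ∧ (PySem.Dict.mk graph).contains v = true ∧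
    ∀ w ∈ (PySem.Dict.mk graph).getD v [], slotOK n w) ∧
  (∀ x ∈ touched start graph, ∀ y ∈ touched start graph, slot n x = slot n y → x = y)
instance (start : Int) (graph : List (Int × List Int)) (n : Int) : Decidable (Pre_bfs start graph n) := by
  unfold Pre_bfs slotOK; infer_instance

def pvWitness_bfs : Int × (List (Int × List Int)) × Int := (0, [(0, [1]), (1, [0])], 1)

def Spec_bfs (start : Int) (graph : List (Int × List Int)) (n : Int) (out : Int) : Prop := out = bfs_alt start graph n
instance (start : Int) (graph : List (Int × List Int)) (n : Int) (out : Int) : Decidable (Spec_bfs start graph n out) := by unfold Spec_bfs; infer_instance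

-- ===== CLAIM (what is proved, stated in full; the proofs are below) =====
def Claim_equal_bfs : Prop := ∀ (start : Int) (graph : List (Int × List Int)) (n : Int), Dom_bfs start graph n → Pre_bfs start graph n → Spec_bfs start graph n (bfs start graph n)

-- ===== LEMMAS AND PROOFS =====

-- the list of first occurrences of elements of l that are not in the seed set s,
-- i.e. the nodes freshly discovered by a marking pass over l
def fresh (s : List Int) : List Int → List Int
  | [] => []
  | i :: t => if i ∈ s then fresh s t else i :: fresh (s ++ [i]) t

theorem mem_fresh {s l : List Int} {x : Int} (h : x ∈ fresh s l) : x ∉ s ∧ x ∈ l := by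
  induction l generalizing s with
  | nil => simp [fresh] at h
  | cons i t ih =>
    simp only [fresh] at h
    by_cases hi : i ∈ s
    · rw [if_pos hi] at h
      obtain ⟨h1, h2⟩ := ih h
      exact ⟨h1, List.mem_cons_of_mem _ h2⟩
    · rw [if_neg hi] at h
      rw [List.mem_cons] at h
      rcases h with h | h
      · subst h; exact ⟨hi, List.mem_cons_self⟩
      · obtain ⟨h1, h2⟩ := ih h
        simp only [List.mem_append, List.mem_singleton, not_or] at h1
        exact ⟨h1.1, List.mem_cons_of_mem _ h2⟩

theorem add_of_mem {s : List Int} {i : Int} (hi : i ∈ s) : PySem.Set.add s i = s := by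
  simp [PySem.Set.add, PySem.Set.contains, hi]

theorem add_of_not_mem {s : List Int} {i : Int} (hi : i ∉ s) : PySem.Set.add s i = s ++ [i] := by
  simp [PySem.Set.add, PySem.Set.contains, hi]

theorem update_eq_append_fresh (l : List Int) : ∀ s : List Int, PySem.Set.update s l = s ++ fresh s l := by
  induction l with
  | nil => intro s; simp [PySem.Set.update, fresh]
  | cons i t ih =>
    intro s
    have h1 : PySem.Set.update s (i :: t) = PySem.Set.update (PySem.Set.add s i) t := rfl
    by_cases hi : i ∈ s
    · rw [h1, add_of_mem hi, ih s]
      simp [fresh, hi]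
    · rw [h1, add_of_not_mem hi, ih (s ++ [i])]
      simp [fresh, hi]

theorem fresh_filter (l : List Int) : ∀ s u : List Int, (∀ x ∈ u, x ∈ s) →
    (fresh u l).filter (fun x => !PySem.Set.contains s x) = fresh s l := by
  induction l with
  | nil => intro s u _; simp [fresh]
  | cons i t ih =>
    intro s u hsub
    by_cases hu : i ∈ u
    · rw [fresh, if_pos hu, fresh, if_pos (hsub i hu)]
      exact ih s u hsub
    · rw [fresh, if_neg hu]
      by_cases hs : i ∈ s
      · rw [fresh, if_pos hs, List.filter_cons, if_neg (by simp [hs])]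
        apply ih s (u ++ [i])
        intro x hx
        rcases List.mem_append.1 hx with h | h
        · exact hsub x h
        · simp only [List.mem_singleton] at h; subst h; exact hs
      · rw [fresh, if_neg hs, List.filter_cons, if_pos (by simp [hs])]
        congr 1
        have step : (fresh (u ++ [i]) t).filter (fun x => !PySem.Set.contains (s ++ [i]) x) =
            fresh (s ++ [i]) t := by
          apply ih
          intro x hx
          rcases List.mem_append.1 hx with h | h
          · exact List.mem_append.2 (Or.inl (hsub x h))
          · exact List.mem_append.2 (Or.inr h)
        rw [← step]
        apply List.filter_congr
        intro x hx
        have hxi : x ∉ u ++ [i] := (mem_fresh hx).1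
        have hxne : x ≠ i := by
          intro h; subst h; exact hxi (List.mem_append.2 (Or.inr (List.mem_singleton.2 rfl)))
        simp [PySem.Set.contains, hxne]

theorem fresh_fresh (l : List Int) : ∀ s u : List Int, (∀ x ∈ u, x ∈ s) →
    fresh s (fresh u l) = fresh s l := by
  induction l with
  | nil => intro s u _; simp [fresh]
  | cons i t ih =>
    intro s u hsub
    by_cases hu : i ∈ u
    · rw [fresh, if_pos hu, ih s u hsub, fresh, if_pos (hsub i hu)]
    · rw [fresh, if_neg hu]
      by_cases hs : i ∈ s
      · rw [fresh, if_pos hs, fresh, if_pos hs]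
        apply ih
        intro x hx
        rcases List.mem_append.1 hx with h | h
        · exact hsub x h
        · simp only [List.mem_singleton] at h; subst h; exact hs
      · rw [fresh, if_neg hs, fresh, if_neg hs]
        congr 1
        apply ih
        intro x hx
        rcases List.mem_append.1 hx with h | h
        · exact List.mem_append.2 (Or.inl (hsub x h))
        · exact List.mem_append.2 (Or.inr h)

theorem ofList_eq_fresh (l : List Int) : PySem.Set.ofList l = fresh [] l := by
  have : PySem.Set.ofList l = PySem.Set.update [] l := rfl
  rw [this, update_eq_append_fresh l []]
  simp

theorem fresh_append (a : List Int) : ∀ (b s : List Int),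
    fresh s (a ++ b) = fresh s a ++ fresh (s ++ fresh s a) b := by
  induction a with
  | nil => intro b s; simp [fresh]
  | cons i t ih =>
    intro b s
    by_cases hi : i ∈ s
    · rw [List.cons_append, fresh, if_pos hi, fresh, if_pos hi, ih b s]
    · rw [List.cons_append, fresh, if_neg hi, fresh, if_neg hi, ih b (s ++ [i])]
      simp [List.append_assoc]

theorem fresh_nodup (l : List Int) : ∀ s : List Int, (fresh s l).Nodup := by
  induction l with
  | nil => intro s; simp [fresh]
  | cons i t ih =>
    intro s
    by_cases hi : i ∈ s
    · rw [fresh, if_pos hi]; exact ih s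
    · rw [fresh, if_neg hi]
      refine List.nodup_cons.2 ⟨?_, ih (s ++ [i])⟩
      intro hmem
      exact (mem_fresh hmem).1 (List.mem_append.2 (Or.inr (List.mem_singleton.2 rfl)))

theorem fresh_of_disjoint (l : List Int) : ∀ s : List Int, l.Nodup → (∀ x ∈ l, x ∉ s) → fresh s l = l := by
  induction l with
  | nil => intro s _ _; simp [fresh]
  | cons i t ih =>
    intro s hnd hdis
    rw [fresh, if_neg (hdis i List.mem_cons_self)]
    congr 1
    apply ih (s ++ [i]) (List.nodup_cons.1 hnd).2
    intro x hx
    rw [List.mem_append]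
    push Not
    refine ⟨hdis x (List.mem_cons_of_mem _ hx), ?_⟩
    simp only [List.mem_singleton]
    intro h; subst h
    exact (List.nodup_cons.1 hnd).1 hx

-- resolve a wrapped index: under slotOK, reading/writing at label i touches slot (slot n i)
theorem access_wrap {n i : Int} (v : List Bool) (hlen : v.length = (n + 1).toNat) (hn : 0 ≤ n)
    (hok : slotOK n i) :
    ∃ k : Nat, ∃ hk : k < v.length, (k : Int) = slot n i ∧
      (∀ d : Bool, PySem.List.pyGetD v i d = v[k]) ∧
      (∀ b : Bool, PySem.List.pySetD v i b = v.set k b) := by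
  obtain ⟨hlo, hhi⟩ := hok
  have hlenI : (v.length : Int) = n + 1 := by rw [hlen]; omega
  have hidx : ∃ k : Nat, k < v.length ∧ (k : Int) = slot n i ∧
      PySem.List.pyIdx? v.length i = some k := by
    unfold PySem.List.pyIdx? slot
    by_cases hi : 0 ≤ i
    · rw [if_pos hi, if_pos (show i < (v.length : Int) by omega), if_neg (show ¬ i < 0 by omega)]
      exact ⟨i.toNat, by omega, by omega, rfl⟩
    · rw [if_neg hi, if_pos (show -(v.length : Int) ≤ i by omega), if_pos (show i < 0 by omega)]
      exact ⟨v.length - (-i).toNat, by omega, by omega, rfl⟩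
  obtain ⟨k, hk, hkslot, hsome⟩ := hidx
  refine ⟨k, hk, hkslot, ?_, ?_⟩
  · intro d
    unfold PySem.List.pyGetD PySem.List.pyGet?
    rw [hsome, Option.bind_some, List.getElem?_eq_getElem hk]
    rfl
  · intro b
    unfold PySem.List.pySetD PySem.List.pySet?
    rw [hsome]
    rfl

-- the invariant tying A's boolean array to the set of discovered nodes:
-- all discovered labels are touched, and a touched label reads true iff discovered
def InvV (n : Int) (T : List Int) (v : List Bool) (s : List Int) : Prop :=
  v.length = (n + 1).toNat ∧ (∀ x ∈ s, x ∈ T) ∧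
  ∀ i ∈ T, (PySem.List.pyGetD v i true = true ↔ i ∈ s)

-- marking one fresh touched node extends the discovered set by exactly that node
theorem InvV_set {n : Int} {T : List Int} {v : List Bool} {s : List Int}
    (hn : 0 ≤ n) (hTok : ∀ x ∈ T, slotOK n x)
    (hTinj : ∀ x ∈ T, ∀ y ∈ T, slot n x = slot n y → x = y)
    (hInv : InvV n T v s) {i : Int} (hiT : i ∈ T) :
    InvV n T (PySem.List.pySetD v i true) (s ++ [i]) := by
  obtain ⟨hlen, hsub, hread⟩ := hInv
  obtain ⟨ki, hki, hkislot, _, hseti⟩ := access_wrap v hlen hn (hTok i hiT)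
  rw [hseti true]
  refine ⟨by rw [List.length_set]; exact hlen, ?_, ?_⟩
  · intro x hx
    rcases List.mem_append.1 hx with h | h
    · exact hsub x h
    · simp only [List.mem_singleton] at h; subst h; exact hiT
  · intro j hjT
    obtain ⟨kj, hkj, hkjslot, hgetj, _⟩ := access_wrap v hlen hn (hTok j hjT)
    obtain ⟨kj', hkj', hkjslot', hgetj', _⟩ :=
      access_wrap (v.set ki true) (by rw [List.length_set]; exact hlen) hn (hTok j hjT)
    simp only [show kj' = kj from by omega] at hgetj'
    rw [hgetj' true, List.getElem_set]
    by_cases hij : i = j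
    · subst hij
      have : ki = kj := by omega
      simp [this]
    · have hne : ki ≠ kj := by
        intro h
        exact hij (hTinj i hiT j hjT (by omega))
      rw [if_neg hne, ← hgetj true, hread j hjT]
      simp [List.mem_append, Ne.symm hij]

theorem expandA_spec {n : Int} {T : List Int} (hn : 0 ≤ n) (hTok : ∀ x ∈ T, slotOK n x)
    (hTinj : ∀ x ∈ T, ∀ y ∈ T, slot n x = slot n y → x = y) (ns : List Int) :
    ∀ (v : List Bool) (s : List Int) (q : List (Int × Int)) (c depth : Int),
    InvV n T v s → (∀ i ∈ ns, i ∈ T) →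
    ∃ v', expandA depth ns (v, q, c) =
        (v', q ++ (fresh s ns).map (fun i => (i, depth + 1)), c + (fresh s ns).length) ∧
      InvV n T v' (s ++ fresh s ns) := by
  induction ns with
  | nil =>
    intro v s q c depth hInv _
    exact ⟨v, by simp [expandA, fresh], by simpa [fresh] using hInv⟩
  | cons i t ih =>
    intro v s q c depth hInv hb
    have hiT : i ∈ T := hb i List.mem_cons_self
    have hbt : ∀ j ∈ t, j ∈ T := fun j hj => hb j (List.mem_cons_of_mem _ hj)
    by_cases hmem : i ∈ s
    · have hread : PySem.List.pyGetD v i true = true := (hInv.2.2 i hiT).2 hmem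
      have hstep : expandA depth (i :: t) (v, q, c) = expandA depth t (v, q, c) := by
        simp [expandA, hread]
      have hf : fresh s (i :: t) = fresh s t := by rw [fresh, if_pos hmem]
      rw [hstep, hf]
      exact ih v s q c depth hInv hbt
    · have hread : PySem.List.pyGetD v i true = false := by
        cases h : PySem.List.pyGetD v i true
        · rfl
        · exact absurd (((hInv.2.2 i hiT).1 h)) hmem
      have hstep : expandA depth (i :: t) (v, q, c) =
          expandA depth t (PySem.List.pySetD v i true, q ++ [(i, depth + 1)], c + 1) := by
        simp [expandA, hread]
      have hInv' := InvV_set hn hTok hTinj hInv hiT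
      obtain ⟨v', heq, hI⟩ :=
        ih (PySem.List.pySetD v i true) (s ++ [i]) (q ++ [(i, depth + 1)]) (c + 1) depth hInv' hbt
      have hf : fresh s (i :: t) = i :: fresh (s ++ [i]) t := by rw [fresh, if_neg hmem]
      refine ⟨v', ?_, ?_⟩
      · rw [hstep, heq, hf]
        simp only [List.map_cons, List.append_assoc, List.singleton_append, List.length_cons,
          Prod.mk.injEq]
        exact ⟨trivial, trivial, by push_cast; ring⟩
      · rw [hf]
        simpa [List.append_assoc] using hI

theorem loop2 {n : Int} {T : List Int} (hn : 0 ≤ n) (hTok : ∀ x ∈ T, slotOK n x)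
    (hTinj : ∀ x ∈ T, ∀ y ∈ T, slot n x = slot n y → x = y)
    (g : PySem.Dict Int (List Int)) (L : List Int) :
    ∀ (v : List Bool) (s : List Int) (q2 : List (Int × Int)) (c : Int),
    InvV n T v s → (∀ x ∈ L, ∀ w ∈ g.getD x [], w ∈ T) → (∀ p ∈ q2, p.2 = 2) →
    bfsLoopA g v (L.map (fun x => (x, (1 : Int))) ++ q2) c =
      c + ((fresh s (L.flatMap (fun x => g.getD x []))).length : Int) := by
  induction L with
  | nil =>
    intro v s q2 c hInv _ hq2
    simp only [List.map_nil, List.nil_append, List.flatMap_nil]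
    rw [show fresh s [] = [] from rfl]
    cases q2 with
    | nil => rw [bfsLoopA]; simp
    | cons p rest =>
      obtain ⟨cur, depth⟩ := p
      have hd : depth = 2 := hq2 (cur, depth) List.mem_cons_self
      subst hd
      rw [bfsLoopA]
      simp
  | cons x t ih =>
    intro v s q2 c hInv hL hq2
    have hx := hL x List.mem_cons_self
    obtain ⟨v', heq, hI⟩ :=
      expandA_spec hn hTok hTinj (g.getD x []) v s (t.map (fun y => (y, (1 : Int))) ++ q2) c 1 hInv
        (fun i hi => hx i hi)
    rw [List.map_cons, List.cons_append, bfsLoopA]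
    have h12 : ((1 : Int) == 2) = false := by decide
    rw [h12]
    simp only [Bool.false_eq_true, if_false, heq]
    rw [List.append_assoc]
    have hq2' : ∀ p ∈ q2 ++ (fresh s (g.getD x [])).map (fun i => (i, (1 : Int) + 1)), p.2 = 2 := by
      intro p hp
      rcases List.mem_append.1 hp with h | h
      · exact hq2 p h
      · obtain ⟨i, _, hi⟩ := List.mem_map.1 h
        rw [← hi]
        norm_num
    have hrec := ih v' (s ++ fresh s (g.getD x []))
      (q2 ++ (fresh s (g.getD x [])).map (fun i => (i, (1 : Int) + 1)))
      (c + ((fresh s (g.getD x [])).length : Int)) hI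
      (fun y hy => hL y (List.mem_cons_of_mem _ hy)) hq2'
    rw [hrec, List.flatMap_cons, fresh_append]
    rw [List.length_append]
    push_cast
    ring

-- B's level-2 accumulation loop is one set-update by the concatenated neighbor lists
theorem foldl_union_flatMap (g : PySem.Dict Int (List Int)) (L : List Int) : ∀ s : List Int,
    L.foldl (fun acc v => PySem.Set.union acc (PySem.Set.ofList (g.getD v []))) s =
      PySem.Set.update s (L.flatMap (fun v => g.getD v [])) := by
  induction L with
  | nil => intro s; rfl
  | cons x t ih =>
    intro s
    rw [List.foldl_cons, ih]
    have h1 : PySem.Set.union s (PySem.Set.ofList (g.getD x [])) = PySem.Set.update s (g.getD x []) := by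
      show PySem.Set.update s (PySem.Set.ofList (g.getD x [])) = _
      rw [update_eq_append_fresh, update_eq_append_fresh, ofList_eq_fresh,
        fresh_fresh _ s [] (by simp)]
    rw [h1, List.flatMap_cons]
    show PySem.Set.update _ _ = _
    unfold PySem.Set.update
    rw [List.foldl_append]

-- ===== VERDICT (by name: the statement is the Claim_ definition above) =====
theorem bfs_spec : Claim_equal_bfs := by
  intro start graph n _ hpre
  obtain ⟨hn, hsok, _, hadj, hinj⟩ := hpre
  unfold Spec_bfs
  set g : PySem.Dict Int (List Int) := PySem.Dict.mk graph with hg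
  set ns0 : List Int := g.getD start [] with hns0
  set L1 : List Int := fresh [start] ns0 with hL1
  set F : List Int := L1.flatMap (fun x => g.getD x []) with hF
  set T : List Int := touched start graph with hT
  have hTview : T = start :: ns0 ++ ns0.flatMap (fun v => g.getD v []) := rfl
  have hTok : ∀ x ∈ T, slotOK n x := by
    intro x hx
    rw [hTview, List.cons_append, List.mem_cons, List.mem_append] at hx
    rcases hx with h | h | h
    · subst h; exact hsok
    · exact (hadj x h).1
    · obtain ⟨v, hv, hw⟩ := List.mem_flatMap.1 h
      exact (hadj v hv).2.2 x hw
  have hstartT : start ∈ T := by rw [hTview]; exact List.mem_cons_self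
  have hns0T : ∀ i ∈ ns0, i ∈ T := by
    intro i hi
    rw [hTview, List.cons_append]
    exact List.mem_cons_of_mem _ (List.mem_append.2 (Or.inl hi))
  -- the invariant holds after 'visited[start] = True'
  have hInv0 : InvV n T (PySem.List.pySetD (List.replicate (n + 1).toNat false) start true)
      [start] := by
    have hlen : (List.replicate (n + 1).toNat false).length = (n + 1).toNat := by simp
    obtain ⟨ks, hks, hksslot, _, hsets⟩ := access_wrap _ hlen hn (hTok start hstartT)
    rw [hsets true]
    refine ⟨by rw [List.length_set]; exact hlen, by simp [hstartT], ?_⟩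
    intro j hjT
    obtain ⟨kj, hkj, hkjslot, hgetj, _⟩ :=
      access_wrap ((List.replicate (n + 1).toNat false).set ks true)
        (by rw [List.length_set]; exact hlen) hn (hTok j hjT)
    rw [hgetj true, List.getElem_set]
    by_cases hsj : start = j
    · subst hsj
      have : ks = kj := by omega
      simp [this]
    · have hne : ks ≠ kj := by
        intro h
        exact hsj (hinj start hstartT j hjT (by omega))
      rw [if_neg hne, List.getElem_replicate]
      simp [Ne.symm hsj]
  obtain ⟨v1, heq1, hI1⟩ := expandA_spec hn hTok hinj ns0
    (PySem.List.pySetD (List.replicate (n + 1).toNat false) start true) [start] [] 0 0 hInv0 hns0T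
  have hboundsL : ∀ x ∈ L1, ∀ w ∈ g.getD x [], w ∈ T := by
    intro x hx w hw
    have hxn : x ∈ ns0 := (mem_fresh (hL1 ▸ hx)).2
    rw [hTview, List.cons_append]
    exact List.mem_cons_of_mem _ (List.mem_append.2 (Or.inr (List.mem_flatMap.2 ⟨x, hxn, hw⟩)))
  -- A's run: one depth-0 expansion, then the depth-1 phase, then break/exhaustion
  have hA : bfs start graph n = 0 + (L1.length : Int) + ((fresh ([start] ++ L1) F).length : Int) := by
    show bfsLoopA g (PySem.List.pySetD (List.replicate (n + 1).toNat false) start true) [(start, 0)] 0 = _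
    rw [bfsLoopA]
    have h02 : ((0 : Int) == 2) = false := by decide
    rw [h02]
    simp only [Bool.false_eq_true, if_false]
    rw [← hns0]
    simp only [heq1]
    have hmap : (fresh [start] ns0).map (fun i => (i, (0 : Int) + 1)) =
        L1.map (fun x => (x, (1 : Int))) ++ [] := by
      rw [← hL1, List.append_nil]
      norm_num
    simp only [List.nil_append, hmap]
    rw [loop2 hn hTok hinj g L1 v1 ([start] ++ L1) [] _ (by simpa [hL1] using hI1) hboundsL
      (by simp)]
  -- B's run: the same sets, computed level-synchronously
  have hofs : PySem.Set.ofList [start] = [start] := rfl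
  have h1 : PySem.Set.diff (PySem.Set.ofList ns0) (PySem.Set.ofList [start]) = L1 := by
    rw [hofs, ofList_eq_fresh, hL1]
    exact fresh_filter ns0 [start] [] (by simp)
  have h2 : PySem.Set.union (PySem.Set.ofList [start]) L1 = [start] ++ L1 := by
    rw [hofs]
    show PySem.Set.update [start] L1 = _
    rw [update_eq_append_fresh]
    congr 1
    apply fresh_of_disjoint L1 [start] (by rw [hL1]; exact fresh_nodup ns0 [start])
    exact fun x hx => (mem_fresh (hL1 ▸ hx)).1
  have h3 : L1.foldl (fun acc v => PySem.Set.union acc (PySem.Set.ofList (g.getD v [])))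
      PySem.Set.empty = fresh [] F := by
    rw [foldl_union_flatMap g L1 PySem.Set.empty, ← hF]
    show PySem.Set.update [] F = fresh [] F
    rw [update_eq_append_fresh F []]
    simp
  have h4 : PySem.Set.diff (fresh [] F) ([start] ++ L1) = fresh ([start] ++ L1) F := by
    exact fresh_filter F ([start] ++ L1) [] (by simp)
  have hB : bfs_alt start graph n = (L1.length : Int) + ((fresh ([start] ++ L1) F).length : Int) := by
    show PySem.Set.len (PySem.Set.diff (PySem.Set.ofList ns0) (PySem.Set.ofList [start])) +
        PySem.Set.len (PySem.Set.diff
          ((PySem.Set.diff (PySem.Set.ofList ns0) (PySem.Set.ofList [start])).foldl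
            (fun acc v => PySem.Set.union acc (PySem.Set.ofList (g.getD v []))) PySem.Set.empty)
          (PySem.Set.union (PySem.Set.ofList [start])
            (PySem.Set.diff (PySem.Set.ofList ns0) (PySem.Set.ofList [start])))) = _
    rw [h1, h2, h3, h4]
    rfl
  rw [hA, hB]
  ring
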